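-- pv_equiv track=rewrite | github.com/autonomxDeveloper/omnix | src/app/rpg/session/state_normalization.py | _normalize_final_narration_text
-- ===== SOURCE A (Python) =====
-- from typing import Any, Dict, List
--
-- def _safe_str(value: Any) -> str:
--     if value is None:
--         return ""
--     if isinstance(value, str):
--         return value
--     return str(value)
--
-- def _normalize_final_narration_text(text: str) -> str:
--     text = _safe_str(text).strip()
--     if not text:
--         return ""
--
--     normalized_lines: List[str] = []
--     for raw_line in text.splitlines():
--         line = " ".join(_safe_str(raw_line).split()).strip()
--         if line:
--             normalized_lines.append(line)
--         elif normalized_lines and normalized_lines[-1] != "":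
--             normalized_lines.append("")
--
--     text = "\n".join(normalized_lines).strip()
--     if text and not text.endswith("...") and text[-1] not in ".!?\"'":
--         text += "."
--     return text
-- ===== SOURCE B (Python) =====
-- def _normalize_final_narration_text(text: str) -> str:
--     text = ("" if text is None else text if isinstance(text, str) else str(text)).strip()
--     if not text:
--         return ""
--
--     # Build paragraphs directly: runs of non-blank cleaned lines, joined by "\n",
--     # then join paragraphs with a single blank line ("\n\n").
--     paragraphs = []
--     current = []
--     for raw_line in text.splitlines():
--         line = " ".join(raw_line.split())
--         if line:
--             current.append(line)
--         elif current:
--             paragraphs.append("\n".join(current))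
--             current = []
--     if current:
--         paragraphs.append("\n".join(current))
--
--     out = "\n\n".join(paragraphs)
--     if out and not out.endswith("...") and out[-1] not in ".!?\"'":
--         out += "."
--     return out
-- ===== Notes on version B (the rewrite author's own statement) =====
-- stated objective: alternative
-- what changed: Instead of building one flat line list whose last element is inspected to decide whether to insert a blank separator and stripping the joined text at the end, B accumulates paragraphs (maximal runs of non-blank cleaned lines, each joined by newlines) and joins the paragraphs with a single blank line, needing no final strip.
import Mathlib
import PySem

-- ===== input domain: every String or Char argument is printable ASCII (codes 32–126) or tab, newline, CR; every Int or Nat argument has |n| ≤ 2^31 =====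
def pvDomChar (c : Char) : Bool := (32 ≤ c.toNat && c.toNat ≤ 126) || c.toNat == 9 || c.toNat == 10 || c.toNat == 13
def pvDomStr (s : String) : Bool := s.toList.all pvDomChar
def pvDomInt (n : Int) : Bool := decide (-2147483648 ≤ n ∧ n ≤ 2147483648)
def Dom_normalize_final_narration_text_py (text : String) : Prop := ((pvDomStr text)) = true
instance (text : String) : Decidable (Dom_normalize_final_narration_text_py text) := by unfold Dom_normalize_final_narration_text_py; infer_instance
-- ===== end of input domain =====

-- B builds paragraphs (runs of non-blank cleaned lines) and joins them with a blank line,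
-- instead of A's flat line list with last-element blank-separator checks and a final strip.


-- ===== PORT A =====
-- line = " ".join(raw_line.split()).strip()
def nfntA_clean (raw : List Char) : List Char :=
  PySem.Chars.strip (PySem.Chars.join [' '] (PySem.Chars.split₀ raw))

-- A's loop body: append non-blank lines; append "" only if last entry is not already ""
def nfntA_step (acc : List (List Char)) (raw : List Char) : List (List Char) :=
  let line := nfntA_clean raw
  if line ≠ [] then acc ++ [line]
  else if acc ≠ [] ∧ PySem.List.pyGet? acc (-1) ≠ some ([] : List Char) then acc ++ [([] : List Char)]
  else acc

-- trailing-period logic, byte-identical in A and B: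
-- if text and not text.endswith("...") and text[-1] not in ".!?\"'": text += "."
def nfnt_finish (t2 : List Char) : List Char :=
  if t2 ≠ [] ∧ PySem.Chars.endswith t2 "...".toList = false ∧
     (PySem.List.pyGet? t2 (-1)).any (fun c => (".!?\"'".toList).contains c) = false
  then t2 ++ ['.'] else t2

def normalize_final_narration_text_py (text : String) : String :=
  let t := PySem.Chars.strip text.toList
  if t = [] then "" else
    let acc := (PySem.Chars.splitlines t).foldl nfntA_step []
    let t2 := PySem.Chars.strip (PySem.Chars.join ['\n'] acc)
    String.ofList (nfnt_finish t2)

-- ===== PORT B =====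
-- B's loop body: accumulate the current paragraph; on a blank line close it (join with "\n")
def nfntB_step (st : List (List Char) × List (List Char)) (raw : List Char) :
    List (List Char) × List (List Char) :=
  let line := PySem.Chars.join [' '] (PySem.Chars.split₀ raw)
  if line ≠ [] then (st.1, st.2 ++ [line])
  else if st.2 ≠ [] then (st.1 ++ [PySem.Chars.join ['\n'] st.2], ([] : List (List Char)))
  else st


def normalize_final_narration_text_py_alt (text : String) : String :=
  let t := PySem.Chars.strip text.toList
  if t = [] then "" else
    let st := (PySem.Chars.splitlines t).foldl nfntB_step ([], [])
    let paras := if st.2 ≠ [] then st.1 ++ [PySem.Chars.join ['\n'] st.2] else st.1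
    String.ofList (nfnt_finish (PySem.Chars.join ['\n', '\n'] paras))

-- ===== PRECONDITION & SPEC =====
def Spec_normalize_final_narration_text_py (text : String) (out : String) : Prop := out = normalize_final_narration_text_py_alt text
instance (text : String) (out : String) : Decidable (Spec_normalize_final_narration_text_py text out) := by unfold Spec_normalize_final_narration_text_py; infer_instance

-- ===== CLAIM (what is proved, stated in full; the proofs are below) =====
def Claim_equal_normalize_final_narration_text_py : Prop := ∀ (text : String), Dom_normalize_final_narration_text_py text → Spec_normalize_final_narration_text_py text (normalize_final_narration_text_py text)

-- ===== LEMMAS AND PROOFS =====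

-- no whitespace character at either edge (vacuous for [])
def nfntEdgeOk (l : List Char) : Prop :=
  (∀ c, l.head? = some c → PySem.Chars.isspace c = false) ∧
  (∀ c, l.getLast? = some c → PySem.Chars.isspace c = false)

-- a word produced by split(): nonempty, no whitespace at all
def nfntWord (w : List Char) : Prop := w ≠ [] ∧ ∀ c ∈ w, PySem.Chars.isspace c = false

theorem nfnt_last_cons (c : Char) (t : List Char) :
    ∃ d r, (c :: t).getLast? = some d ∧ (c :: t).reverse = d :: r := by
  cases ht : (c :: t).getLast? with
  | none => simp at ht
  | some d =>
    have hh : (c :: t).reverse.head? = some d := by rw [List.head?_reverse]; exact ht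
    rcases hr : (c :: t).reverse with _ | ⟨e, r⟩
    · rw [hr] at hh; simp at hh
    · rw [hr] at hh; simp at hh; exact ⟨d, r, rfl, by rw [hh]⟩

theorem nfnt_strip_of_edgeOk (l : List Char) (h : nfntEdgeOk l) : PySem.Chars.strip l = l := by
  rcases l with _ | ⟨c, t⟩
  · rfl
  · have hc := h.1 c (by simp)
    obtain ⟨d, r, hd, hr⟩ := nfnt_last_cons c t
    have hdn := h.2 d hd
    show PySem.Chars.rstrip (PySem.Chars.lstrip (c :: t)) = c :: t
    rw [show PySem.Chars.lstrip (c :: t) = c :: t by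
      unfold PySem.Chars.lstrip; rw [List.dropWhile_cons, if_neg (by simp [hc])]]
    unfold PySem.Chars.rstrip
    rw [hr, List.dropWhile_cons, if_neg (by simp [hdn]), ← hr, List.reverse_reverse]

theorem nfnt_strip_append_newline (l : List Char) (h : nfntEdgeOk l) :
    PySem.Chars.strip (l ++ ['\n']) = l := by
  rcases l with _ | ⟨c, t⟩
  · rfl
  · have hc := h.1 c (by simp)
    obtain ⟨d, r, hd, hr⟩ := nfnt_last_cons c t
    have hdn := h.2 d hd
    show PySem.Chars.rstrip (PySem.Chars.lstrip ((c :: t) ++ ['\n'])) = c :: t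
    rw [show PySem.Chars.lstrip ((c :: t) ++ ['\n']) = (c :: t) ++ ['\n'] by
      unfold PySem.Chars.lstrip; rw [List.cons_append, List.dropWhile_cons, if_neg (by simp [hc])]]
    unfold PySem.Chars.rstrip
    rw [show ((c :: t) ++ ['\n']).reverse = '\n' :: (c :: t).reverse by simp]
    rw [List.dropWhile_cons, if_pos (by decide), hr, List.dropWhile_cons,
      if_neg (by simp [hdn]), ← hr, List.reverse_reverse]

theorem nfnt_split₀_go_words (s cur : List Char) (acc : List (List Char))
    (hcur : ∀ c ∈ cur, PySem.Chars.isspace c = false) (hacc : ∀ w ∈ acc, nfntWord w) :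
    ∀ w ∈ PySem.Chars.split₀.go s cur acc, nfntWord w := by
  induction s generalizing cur acc with
  | nil =>
    intro w hw
    unfold PySem.Chars.split₀.go at hw
    by_cases hc : cur.isEmpty
    · rw [if_pos hc] at hw; exact hacc w (List.mem_reverse.mp hw)
    · rw [if_neg hc] at hw
      rcases List.mem_cons.mp (List.mem_reverse.mp hw) with h | h
      · subst h
        exact ⟨by simpa [List.isEmpty_iff] using hc, fun c hch => hcur c (List.mem_reverse.mp hch)⟩
      · exact hacc w h
  | cons c rest ih =>
    intro w hw
    unfold PySem.Chars.split₀.go at hw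
    by_cases hs : PySem.Chars.isspace c
    · rw [if_pos hs] at hw
      by_cases hc : cur.isEmpty
      · rw [if_pos hc] at hw; exact ih [] acc (by simp) hacc w hw
      · rw [if_neg hc] at hw
        refine ih [] _ (by simp) ?_ w hw
        intro v hv
        rcases List.mem_cons.mp hv with h | h
        · subst h
          exact ⟨by simpa [List.isEmpty_iff] using hc, fun d hd => hcur d (List.mem_reverse.mp hd)⟩
        · exact hacc v h
    · rw [if_neg hs] at hw
      refine ih (c :: cur) acc ?_ hacc w hw
      intro d hd
      rcases List.mem_cons.mp hd with h | h
      · subst h; simpa using hs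
      · exact hcur d h

theorem nfnt_split₀_words (s : List Char) : ∀ w ∈ PySem.Chars.split₀ s, nfntWord w :=
  nfnt_split₀_go_words s [] [] (by simp) (by simp)

theorem nfnt_join_ne_nil (sep : List Char) (ws : List (List Char)) (hne : ws ≠ [])
    (h : ∀ w ∈ ws, nfntWord w) : PySem.Chars.join sep ws ≠ [] := by
  rcases ws with _ | ⟨w, t⟩
  · exact absurd rfl hne
  · have hw := (h w (by simp)).1
    rcases t with _ | ⟨v, t⟩
    · rw [PySem.Chars.join_singleton]; exact hw
    · rw [PySem.Chars.join_cons_cons]; simp [hw]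

theorem nfnt_edgeOk_join_words (ws : List (List Char)) (h : ∀ w ∈ ws, nfntWord w) :
    nfntEdgeOk (PySem.Chars.join [' '] ws) := by
  induction ws with
  | nil => exact ⟨by simp [PySem.Chars.join_nil], by simp [PySem.Chars.join_nil]⟩
  | cons w t ih =>
    have hw := h w (by simp)
    rcases t with _ | ⟨v, t⟩
    · rw [PySem.Chars.join_singleton]
      exact ⟨fun c hc => hw.2 c (List.mem_of_mem_head? hc),
             fun c hc => hw.2 c (List.mem_of_mem_getLast? hc)⟩
    · rw [PySem.Chars.join_cons_cons]
      have iht := ih (fun u hu => h u (List.mem_cons_of_mem _ hu))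
      have hjn : PySem.Chars.join [' '] (v :: t) ≠ [] :=
        nfnt_join_ne_nil _ _ (by simp) (fun u hu => h u (List.mem_cons_of_mem _ hu))
      constructor
      · intro c hc
        rw [List.append_assoc, List.head?_append] at hc
        rcases hh : w.head? with _ | e
        · rw [List.head?_eq_none_iff] at hh; exact absurd hh hw.1
        · rw [hh] at hc; simp at hc; obtain rfl := hc; exact hw.2 _ (List.mem_of_mem_head? hh)
      · intro c hc
        rw [List.append_assoc, List.getLast?_append, List.getLast?_append] at hc
        rcases hgg : (PySem.Chars.join [' '] (v :: t)).getLast? with _ | f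
        · exact absurd (List.getLast?_eq_none_iff.mp hgg) hjn
        · rw [hgg] at hc; simp at hc; obtain rfl := hc; exact iht.2 _ hgg

theorem nfnt_join_append (sep : List Char) (xs ys : List (List Char)) (hx : xs ≠ []) (hy : ys ≠ []) :
    PySem.Chars.join sep (xs ++ ys) = PySem.Chars.join sep xs ++ sep ++ PySem.Chars.join sep ys := by
  induction xs with
  | nil => exact absurd rfl hx
  | cons x t ih =>
    rcases t with _ | ⟨u, t⟩
    · rcases ys with _ | ⟨y, ys⟩
      · exact absurd rfl hy
      · rw [List.singleton_append, PySem.Chars.join_cons_cons, PySem.Chars.join_singleton]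
    · rw [show (x :: u :: t) ++ ys = x :: u :: (t ++ ys) by simp,
        PySem.Chars.join_cons_cons,
        show u :: (t ++ ys) = (u :: t) ++ ys by simp,
        ih (by simp), PySem.Chars.join_cons_cons]
      simp [List.append_assoc]

theorem nfnt_pyGet_neg_one (xs : List (List Char)) : PySem.List.pyGet? xs (-1) = xs.getLast? := by
  simp [PySem.List.pyGet?, PySem.List.pyIdx?]
  rcases xs with _ | ⟨x, t⟩
  · simp
  · simp [List.getLast?_eq_getElem?]

theorem nfnt_edgeOk_glue (a b sep : List Char) (ha : a ≠ []) (hb : b ≠ [])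
    (ea : nfntEdgeOk a) (eb : nfntEdgeOk b) : nfntEdgeOk (a ++ sep ++ b) := by
  constructor
  · intro c hc
    rw [List.append_assoc, List.head?_append] at hc
    rcases hh : a.head? with _ | e
    · rw [List.head?_eq_none_iff] at hh; exact absurd hh ha
    · rw [hh] at hc; simp at hc; obtain rfl := hc; exact ea.1 _ hh
  · intro c hc
    rw [List.getLast?_append] at hc
    rcases hh : b.getLast? with _ | e
    · rw [List.getLast?_eq_none_iff] at hh; exact absurd hh hb
    · rw [hh] at hc; simp at hc; obtain rfl := hc; exact eb.2 _ hh

-- the invariant tying A's flat line list to B's (paragraphs, current) state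
def nfntInv (acc : List (List Char)) (st : List (List Char) × List (List Char)) : Prop :=
  (acc = [] ∧ st.1 = [] ∧ st.2 = [])
  ∨ (st.2 ≠ [] ∧ acc ≠ [] ∧ acc.getLast? ≠ some ([] : List Char)
      ∧ PySem.Chars.join ['\n'] acc
          = PySem.Chars.join ['\n', '\n'] (st.1 ++ [PySem.Chars.join ['\n'] st.2])
      ∧ PySem.Chars.join ['\n'] acc ≠ [] ∧ nfntEdgeOk (PySem.Chars.join ['\n'] acc))
  ∨ (st.2 = [] ∧ st.1 ≠ [] ∧ ∃ X, acc = X ++ [([] : List Char)]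
      ∧ PySem.Chars.join ['\n'] X = PySem.Chars.join ['\n', '\n'] st.1
      ∧ PySem.Chars.join ['\n'] X ≠ [] ∧ nfntEdgeOk (PySem.Chars.join ['\n'] X))

theorem nfnt_inv_step (acc : List (List Char)) (st : List (List Char) × List (List Char))
    (raw : List Char) (h : nfntInv acc st) :
    nfntInv (nfntA_step acc raw) (nfntB_step st raw) := by
  obtain ⟨p, cur⟩ := st
  have hwords := nfnt_split₀_words raw
  have hedge : nfntEdgeOk (PySem.Chars.join [' '] (PySem.Chars.split₀ raw)) :=
    nfnt_edgeOk_join_words _ hwords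
  have hclean : nfntA_clean raw = PySem.Chars.join [' '] (PySem.Chars.split₀ raw) :=
    nfnt_strip_of_edgeOk _ hedge
  by_cases hL : PySem.Chars.join [' '] (PySem.Chars.split₀ raw) = []
  · -- blank cleaned line
    have hA : ∀ a, nfntA_step a raw =
        if a ≠ [] ∧ PySem.List.pyGet? a (-1) ≠ some ([] : List Char) then a ++ [([] : List Char)] else a := by
      intro a; unfold nfntA_step; rw [hclean, hL]; simp
    have hB : nfntB_step (p, cur) raw =
        if cur ≠ [] then (p ++ [PySem.Chars.join ['\n'] cur], ([] : List (List Char))) else (p, cur) := by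
      unfold nfntB_step; rw [hL]; simp
    rcases h with ⟨h1, h2, h3⟩ | ⟨h1, h2, h3, h4, h5, h6⟩ | ⟨h1, h2, X, h3, h4, h5, h6⟩
    · -- both empty: nothing happens
      simp only at h2 h3
      rw [hA, hB, if_neg (by simp [h1]), if_neg (by simp [h3])]
      exact Or.inl ⟨h1, h2, h3⟩
    · -- close the paragraph
      simp only at h1 h2 h3 h4 h5 h6
      rw [hA, hB, if_pos ⟨h2, by rw [nfnt_pyGet_neg_one]; exact h3⟩, if_pos h1]
      exact Or.inr (Or.inr ⟨rfl, by simp, acc, rfl, h4, h5, h6⟩)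
    · -- already closed: both unchanged
      simp only at h1 h2 h3 h4 h5 h6
      rw [hA, hB, if_neg (by rw [nfnt_pyGet_neg_one, h3]; simp), if_neg (by simp [h1])]
      exact Or.inr (Or.inr ⟨h1, h2, X, h3, h4, h5, h6⟩)
  · -- non-blank cleaned line L
    set L := PySem.Chars.join [' '] (PySem.Chars.split₀ raw) with hLdef
    have hA : nfntA_step acc raw = acc ++ [L] := by
      unfold nfntA_step; rw [hclean]; simp [hL]
    have hB : nfntB_step (p, cur) raw = (p, cur ++ [L]) := by
      unfold nfntB_step; rw [← hLdef]; simp [hL]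
    rw [hA, hB]
    rcases h with ⟨h1, h2, h3⟩ | ⟨h1, h2, h3, h4, h5, h6⟩ | ⟨h1, h2, X, h3, h4, h5, h6⟩
    · -- start the first paragraph
      simp only at h2 h3
      subst h1; subst h2; subst h3
      refine Or.inr (Or.inl ⟨by simp, by simp, ?_, ?_, ?_, ?_⟩)
      · simp [hL]
      · simp [PySem.Chars.join_singleton]
      · simp [PySem.Chars.join_singleton, hL]
      · simpa [PySem.Chars.join_singleton] using hedge
    · -- extend the current paragraph
      simp only at h1 h2 h3 h4 h5 h6
      have hacc : PySem.Chars.join ['\n'] (acc ++ [L])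
          = PySem.Chars.join ['\n'] acc ++ ['\n'] ++ L := by
        rw [nfnt_join_append _ _ _ h2 (by simp), PySem.Chars.join_singleton]
      have hcur : PySem.Chars.join ['\n'] (cur ++ [L])
          = PySem.Chars.join ['\n'] cur ++ ['\n'] ++ L := by
        rw [nfnt_join_append _ _ _ h1 (by simp), PySem.Chars.join_singleton]
      refine Or.inr (Or.inl ⟨by simp, by simp, by simp [hL], ?_, ?_, ?_⟩)
      · simp only
        rw [hacc, hcur, h4]
        by_cases hp : p = []
        · subst hp; simp [PySem.Chars.join_singleton]
        · rw [nfnt_join_append _ _ _ hp (by simp), nfnt_join_append _ _ _ hp (by simp),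
            PySem.Chars.join_singleton, PySem.Chars.join_singleton]
          simp [List.append_assoc]
      · rw [hacc]; simp
      · rw [hacc]; exact nfnt_edgeOk_glue _ _ _ h5 hL h6 hedge
    · -- start a new paragraph after a closed one
      simp only at h1 h2 h3 h4 h5 h6
      subst h1; subst h3
      have hX : X ≠ [] := by intro hXn; rw [hXn, PySem.Chars.join_nil] at h5; exact h5 rfl
      have hacc : PySem.Chars.join ['\n'] ((X ++ [([] : List Char)]) ++ [L])
          = PySem.Chars.join ['\n'] X ++ ['\n', '\n'] ++ L := by
        rw [nfnt_join_append _ _ _ (by simp) (by simp : ([L] : List (List Char)) ≠ []),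
          nfnt_join_append _ _ _ hX (by simp), PySem.Chars.join_singleton,
          PySem.Chars.join_singleton]
        simp
      refine Or.inr (Or.inl ⟨by simp, by simp, by simp [hL], ?_, ?_, ?_⟩)
      · simp only [List.nil_append]
        rw [hacc, PySem.Chars.join_singleton,
          nfnt_join_append _ _ _ h2 (by simp), PySem.Chars.join_singleton, h4]
      · rw [hacc]; simp
      · rw [hacc]; exact nfnt_edgeOk_glue _ _ _ h5 hL h6 hedge

theorem nfnt_inv_foldl (L : List (List Char)) (acc : List (List Char))
    (st : List (List Char) × List (List Char)) (h : nfntInv acc st) :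
    nfntInv (L.foldl nfntA_step acc) (L.foldl nfntB_step st) := by
  induction L generalizing acc st with
  | nil => exact h
  | cons x xs ih => exact ih _ _ (nfnt_inv_step _ _ _ h)

-- the two joined texts agree after A's final strip
theorem nfnt_final_eq (acc : List (List Char)) (st : List (List Char) × List (List Char))
    (h : nfntInv acc st) :
    PySem.Chars.strip (PySem.Chars.join ['\n'] acc)
      = PySem.Chars.join ['\n', '\n']
          (if st.2 ≠ [] then st.1 ++ [PySem.Chars.join ['\n'] st.2] else st.1) := by
  rcases h with ⟨h1, h2, h3⟩ | ⟨h1, h2, h3, h4, h5, h6⟩ | ⟨h1, h2, X, h3, h4, h5, h6⟩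
  · rw [h1, h2, if_neg (by simp [h3])]; simp [PySem.Chars.join_nil]; rfl
  · rw [if_pos h1, ← h4]; exact nfnt_strip_of_edgeOk _ h6
  · rw [if_neg (by simp [h1]), ← h4, h3]
    have hX : X ≠ [] := by intro hXn; rw [hXn, PySem.Chars.join_nil] at h5; exact h5 rfl
    rw [show PySem.Chars.join ['\n'] (X ++ [([] : List Char)])
        = PySem.Chars.join ['\n'] X ++ ['\n'] by
      rw [nfnt_join_append _ _ _ hX (by simp), PySem.Chars.join_singleton]; simp]
    exact nfnt_strip_append_newline _ h6

-- ===== VERDICT (by name: the statement is the Claim_ definition above) =====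
theorem normalize_final_narration_text_py_spec : Claim_equal_normalize_final_narration_text_py := by
  intro text _
  unfold Spec_normalize_final_narration_text_py
  unfold normalize_final_narration_text_py normalize_final_narration_text_py_alt
  simp only
  by_cases ht : PySem.Chars.strip text.toList = []
  · rw [if_pos ht, if_pos ht]
  · rw [if_neg ht, if_neg ht]
    have hinv := nfnt_inv_foldl (PySem.Chars.splitlines (PySem.Chars.strip text.toList))
      [] ([], []) (Or.inl ⟨rfl, rfl, rfl⟩)
    rw [nfnt_final_eq _ _ hinv]
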